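-- pv_equiv track=rewrite | github.com/IMCG/icoding | TopCoder/SRM616_.py | countAlarms
-- ===== SOURCE A (Python) =====
-- import itertools
--
-- def countAlarms(volume,S):
--     i=0
--     for a in itertools.cycle(volume):
--         i+=1
--         S-=a
--         if S<=0:
--             break;
--     return i
-- ===== SOURCE B (Python) =====
-- import itertools
--
-- def countAlarms(volume, S):
--     # prefix sums once; answer inside the first cycle by one scan, otherwise skip all
--     # full cycles at once with a ceiling division by the cycle sum
--     prefix = list(itertools.accumulate(volume))
--     r = _first_ge(prefix, S)
--     if r is not None:
--         return r
--     T = prefix[-1]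
--     if T <= 0:
--         return -1  # the volumes can never exhaust S: no number of alarms works
--     q = -((max(prefix) - S) // T)
--     return q * len(volume) + _first_ge(prefix, S - q * T)
--
-- def _first_ge(prefix, bound):
--     for r, p in enumerate(prefix, 1):
--         if p >= bound:
--             return r
--     return None
-- ===== Notes on version B (the rewrite author's own statement) =====
-- stated objective: alternative
-- what changed: Instead of subtracting one alarm at a time around the cycle, B builds the prefix sums once, answers within the first cycle by a single scan, and otherwise skips all full cycles at once with a ceiling division by the cycle sum; where the cycle sum cannot exhaust S (A loops forever, outside Pre_) B returns a -1 sentinel.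
-- outside the precondition, e.g. on countAlarms([], 5): A returns 0, B raises IndexError
import Mathlib
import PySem

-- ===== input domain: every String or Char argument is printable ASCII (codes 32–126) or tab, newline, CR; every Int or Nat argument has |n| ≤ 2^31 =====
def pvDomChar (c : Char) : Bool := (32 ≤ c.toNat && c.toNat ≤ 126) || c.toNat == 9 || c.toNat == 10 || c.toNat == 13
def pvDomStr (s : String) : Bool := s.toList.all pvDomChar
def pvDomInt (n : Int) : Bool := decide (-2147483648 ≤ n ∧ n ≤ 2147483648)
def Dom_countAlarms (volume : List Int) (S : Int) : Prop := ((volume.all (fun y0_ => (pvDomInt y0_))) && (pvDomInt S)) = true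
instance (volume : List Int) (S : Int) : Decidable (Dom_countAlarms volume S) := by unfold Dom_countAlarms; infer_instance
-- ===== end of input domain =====

-- B replaces A's one-subtraction-per-alarm loop by prefix sums plus a ceiling division that
-- skips all full cycles at once (a different algorithm; a timing run could not confirm
-- a measurable speed-up on its input family, so no speed is claimed).


-- ===== PORT A =====
-- A's `for a in itertools.cycle(volume)` is an unbounded loop; it is ported with a fuel
-- parameter that only guards totality: under Pre_countAlarms the fuel passed below is
-- proved sufficient, so the loop always stops via its own `S' ≤ 0` break.
def countAlarmsLoop (volume : List Int) : Nat → List Int → Int → Int → Int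
  | 0, _, i, _ => i
  | Nat.succ f, [], i, S => countAlarmsLoop volume f volume i S
  | Nat.succ f, a :: rest, i, S =>
      if S - a ≤ 0 then i + 1 else countAlarmsLoop volume f rest (i + 1) (S - a)

def countAlarms (volume : List Int) (S : Int) : Int :=
  countAlarmsLoop volume ((S.toNat + 1) * (volume.length + 1)) volume 0 S

-- ===== PORT B =====
-- the running-sum loop of Source B building `prefix`
def prefixAux : List Int → Int → List Int
  | [], _ => []
  | a :: xs, t => (t + a) :: prefixAux xs (t + a)

-- Source B's `_first_ge`: first 1-based position whose prefix sum reaches `b`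
def firstGE : List Int → Int → Int → Option Int
  | [], _, _ => none
  | p :: ps, b, r => if b ≤ p then some r else firstGE ps b (r + 1)

-- Source B's code after the early return: T = prefix[-1]; if T <= 0: return -1;
-- q = -((max(prefix) - S) // T); return q * len(volume) + _first_ge(prefix, S - q * T).
-- Python's prefix[-1] / max(prefix) raise on an empty list (outside Pre_countAlarms), and
-- with 0 < T the second _first_ge always hits, so its None default is never used.
def altFull (volume : List Int) (S : Int) : Int :=
  let pres := prefixAux volume 0
  let T := (PySem.List.pyGet? pres (-1)).getD 0
  if T ≤ 0 then -1
  else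
    let q := -(PySem.Int.floordiv ((PySem.List.max? pres (fun y => y)).getD 0 - S) T)
    q * PySem.List.len volume + (firstGE pres (S - q * T) 1).getD 0

def countAlarms_alt (volume : List Int) (S : Int) : Int :=
  match firstGE (prefixAux volume 0) S 1 with
  | some r => r
  | none => altFull volume S

-- ===== PRECONDITION & SPEC =====
-- Pre_ excludes volume = [] (A's loop over cycle([]) silently returns the leftover 0 while
-- B raises IndexError) and the inputs whose cycle sum is ≤ 0 with no prefix sum reaching S,
-- on which A never breaks and diverges (B returns its -1 sentinel there).
def Pre_countAlarms (volume : List Int) (S : Int) : Prop :=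
  volume ≠ [] ∧ (0 < volume.sum ∨ ∃ k ∈ List.range volume.length, S ≤ (volume.take (k + 1)).sum)
instance (volume : List Int) (S : Int) : Decidable (Pre_countAlarms volume S) := by
  unfold Pre_countAlarms; infer_instance

def pvWitness_countAlarms : List Int × Int := ([1, 2], 5)

def Spec_countAlarms (volume : List Int) (S : Int) (out : Int) : Prop := out = countAlarms_alt volume S
instance (volume : List Int) (S : Int) (out : Int) : Decidable (Spec_countAlarms volume S out) := by unfold Spec_countAlarms; infer_instance

-- ===== CLAIM (what is proved, stated in full; the proofs are below) =====
def Claim_equal_countAlarms : Prop := ∀ (volume : List Int) (S : Int), Dom_countAlarms volume S → Pre_countAlarms volume S → Spec_countAlarms volume S (countAlarms volume S)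

-- ===== LEMMAS AND PROOFS =====

lemma prefixAux_shift : ∀ (xs : List Int) (t : Int), prefixAux xs t = (prefixAux xs 0).map (fun p => t + p)
  | [], _ => rfl
  | a :: xs, t => by
      simp only [prefixAux, prefixAux_shift xs (t + a), prefixAux_shift xs (0 + a),
        List.map_map, List.map_cons]
      congr 1
      · ring
      · exact List.map_congr_left (fun x _ => by simp only [Function.comp_apply]; ring)

lemma prefixAux_ne_nil (xs : List Int) (t : Int) (h : xs ≠ []) : prefixAux xs t ≠ [] := by
  cases xs with
  | nil => exact absurd rfl h
  | cons a xs => simp [prefixAux]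

lemma getLast?_prefixAux : ∀ (xs : List Int) (t : Int), xs ≠ [] → (prefixAux xs t).getLast? = some (t + xs.sum)
  | [], _, h => absurd rfl h
  | [a], t, _ => by simp [prefixAux]
  | a :: b :: xs, t, _ => by
      have ih := getLast?_prefixAux (b :: xs) (t + a) (by simp)
      simp only [prefixAux] at ih ⊢
      rw [List.getLast?_cons_cons, ih]
      simp only [List.sum_cons]
      ring_nf

lemma prefixAux_eq (xs : List Int) :
    prefixAux xs 0 = (List.range xs.length).map (fun k => (xs.take (k + 1)).sum) := by
  induction xs with
  | nil => rfl
  | cons a xs ih =>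
      simp only [prefixAux, prefixAux_shift xs (0 + a), ih, List.length_cons,
        List.range_succ_eq_map, List.map_cons, List.map_map]
      congr 1
      · simp
      · exact List.map_congr_left (fun k _ => by
          simp only [Function.comp_apply, List.take_succ_cons, List.sum_cons]
          ring)

lemma firstGE_none_iff (ps : List Int) (b : Int) : ∀ r, firstGE ps b r = none ↔ ∀ p ∈ ps, p < b := by
  induction ps with
  | nil => intro r; simp [firstGE]
  | cons p ps ih =>
      intro r
      simp only [firstGE, List.mem_cons]
      split_ifs with h
      · simp only [false_iff]
        intro hall
        exact absurd (hall p (Or.inl rfl)) (by omega)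
      · rw [ih]
        constructor
        · rintro hall q (rfl | hq)
          · omega
          · exact hall q hq
        · intro hall q hq
          exact hall q (Or.inr hq)

lemma firstGE_some_exists (b : Int) : ∀ (ps : List Int) (r r' : Int), firstGE ps b r = some r' → ∃ p ∈ ps, b ≤ p
  | [], _, _, h => by simp [firstGE] at h
  | p :: ps, r, r', h => by
      by_cases hc : b ≤ p
      · exact ⟨p, by simp, hc⟩
      · simp only [firstGE, if_neg hc] at h
        obtain ⟨q, hq, hle⟩ := firstGE_some_exists b ps (r + 1) r' h
        exact ⟨q, by simp [hq], hle⟩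

lemma firstGE_succ (b : Int) : ∀ (ps : List Int) (r : Int), firstGE ps b (r + 1) = (firstGE ps b r).map (· + 1)
  | [], _ => rfl
  | p :: ps, r => by
      simp only [firstGE]
      split_ifs with h
      · rfl
      · exact firstGE_succ b ps (r + 1)

lemma firstGE_map_add (b a : Int) : ∀ (ps : List Int) (r : Int),
    firstGE (ps.map (fun p => a + p)) b r = firstGE ps (b - a) r
  | [], _ => rfl
  | p :: ps, r => by
      simp only [List.map_cons, firstGE]
      have hiff : (b ≤ a + p) ↔ (b - a ≤ p) := by omega
      simp only [hiff]
      split_ifs with h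
      · rfl
      · exact firstGE_map_add b a ps (r + 1)

-- one pass of A's loop over `rest`: either the break fires at the first prefix reaching S,
-- or the whole of `rest` is consumed
lemma loopA_go (v : List Int) : ∀ (rest : List Int) (i S : Int) (F : Nat), rest.length ≤ F →
    countAlarmsLoop v F rest i S =
      match firstGE (prefixAux rest 0) S 1 with
      | some r => i + r
      | none => countAlarmsLoop v (F - rest.length) [] (i + (rest.length : Int)) (S - rest.sum)
  | [], i, S, F, h => by simp [prefixAux, firstGE]
  | a :: rest, i, S, F, h => by
      obtain ⟨f, rfl⟩ : ∃ f, F = f + 1 := ⟨F - 1, by simp at h; omega⟩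
      have hfa : prefixAux (a :: rest) 0 = (0 + a) :: (prefixAux rest 0).map (fun p => (0 + a) + p) := by
        rw [prefixAux, prefixAux_shift]
      simp only [countAlarmsLoop]
      by_cases hc : S - a ≤ 0
      · rw [if_pos hc, hfa]
        simp only [firstGE, zero_add, if_pos (by omega : S ≤ a)]
      · rw [if_neg hc, loopA_go v rest (i + 1) (S - a) f (by simp at h; omega), hfa]
        simp only [firstGE, zero_add, if_neg (by omega : ¬ S ≤ a)]
        rw [firstGE_succ, firstGE_map_add]
        cases hfg : firstGE (prefixAux rest 0) (S - a) 1 with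
        | some r =>
            simp only [Option.map_some]
            show i + 1 + r = i + (r + 1)
            ring
        | none =>
            simp only [Option.map_none]
            have e1 : f - rest.length = f + 1 - (a :: rest).length := by
              simp only [List.length_cons]; omega
            have e2 : i + 1 + (rest.length : Int) = i + ((a :: rest).length : Int) := by
              simp only [List.length_cons]; push_cast; ring
            have e3 : S - a - rest.sum = S - (a :: rest).sum := by
              simp only [List.sum_cons]; ring
            rw [e1, e2, e3]

-- B's recurrence: when the first cycle does not reach S, one full cycle is peeled off
lemma alt_rec (v : List Int) (S : Int) (hv : v ≠ []) (hT : 0 < v.sum)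
    (hnone : firstGE (prefixAux v 0) S 1 = none) :
    countAlarms_alt v S = (v.length : Int) + countAlarms_alt v (S - v.sum) := by
  have hlast : (prefixAux v 0).getLast? = some v.sum := by
    rw [getLast?_prefixAux v 0 hv]; ring_nf
  have hTmem : v.sum ∈ prefixAux v 0 := List.mem_of_getLast? hlast
  obtain ⟨m, hm⟩ : ∃ m, PySem.List.max? (prefixAux v 0) (fun y => y) = some m := by
    cases hmm : PySem.List.max? (prefixAux v 0) (fun y => y) with
    | none => exact absurd ((PySem.List.max?_eq_none_iff (prefixAux v 0) (fun y => y)).mp hmm) (prefixAux_ne_nil v 0 hv)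
    | some m => exact ⟨m, rfl⟩
  have hmax : ∀ p ∈ prefixAux v 0, p ≤ m := by
    intro p hp
    exact PySem.List.max?_isMax hm p hp
  have hmS : m < S := (firstGE_none_iff (prefixAux v 0) S 1).mp hnone m (PySem.List.max?_mem hm)
  have hTm : v.sum ≤ m := hmax _ hTmem
  have hfd : ∀ x : Int, PySem.Int.floordiv (x + v.sum) v.sum = PySem.Int.floordiv x v.sum + 1 := by
    intro x
    show Int.fdiv _ _ = Int.fdiv _ _ + 1
    rw [show x + v.sum = x + 1 * v.sum by ring, Int.add_mul_fdiv_right x 1 (by omega)]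
  simp only [countAlarms_alt, hnone, altFull, PySem.List.pyGet?_neg_one, hlast, hm,
    Option.getD_some, PySem.List.len_eq, if_neg (show ¬ v.sum ≤ 0 by omega)]
  cases hfg2 : firstGE (prefixAux v 0) (S - v.sum) 1 with
  | some r =>
      have hq : -(PySem.Int.floordiv (m - S) v.sum) = 1 := by
        obtain ⟨p, hp, hple⟩ := firstGE_some_exists (S - v.sum) (prefixAux v 0) 1 r hfg2
        have hSm : S - v.sum ≤ m := le_trans hple (hmax p hp)
        rw [show m - S = -(S - m) by ring]
        exact (PySem.Int.neg_floordiv_neg_eq_iff_of_pos (by omega)).mpr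
          ⟨by linarith, by linarith⟩
      rw [hq, show S - 1 * v.sum = S - v.sum by ring, hfg2]
      simp
  | none =>
      have hq' : PySem.Int.floordiv (m - (S - v.sum)) v.sum = PySem.Int.floordiv (m - S) v.sum + 1 := by
        rw [show m - (S - v.sum) = (m - S) + v.sum by ring, hfd]
      rw [hq']
      rw [show S - v.sum - -(PySem.Int.floordiv (m - S) v.sum + 1) * v.sum
            = S - -(PySem.Int.floordiv (m - S) v.sum) * v.sum by ring]
      ring

-- main induction: with enough fuel A's loop returns i + B's value
lemma loopA_main : ∀ (N : Nat) (v : List Int) (S : Int), S.toNat ≤ N → v ≠ [] →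
    (0 < v.sum ∨ ∃ q ∈ prefixAux v 0, S ≤ q) →
    ∀ (i : Int) (F : Nat), (S.toNat + 1) * (v.length + 1) ≤ F →
    countAlarmsLoop v F v i S = i + countAlarms_alt v S := by
  intro N
  induction N using Nat.strong_induction_on with
  | _ N IH =>
      intro v S hSN hv hdisj i F hF
      have hn1 : 1 ≤ v.length := by
        cases v with
        | nil => exact absurd rfl hv
        | cons a v => simp
      have hlenF : v.length ≤ F := by
        calc v.length ≤ 1 * (v.length + 1) := by omega
        _ ≤ (S.toNat + 1) * (v.length + 1) := Nat.mul_le_mul_right _ (by omega)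
        _ ≤ F := hF
      rw [loopA_go v v i S F hlenF]
      cases hfg : firstGE (prefixAux v 0) S 1 with
      | some r =>
          simp only [countAlarms_alt, hfg]
      | none =>
          have hall : ∀ p ∈ prefixAux v 0, p < S := (firstGE_none_iff _ S 1).mp hfg
          have hT : 0 < v.sum := by
            rcases hdisj with h | ⟨q, hq, hle⟩
            · exact h
            · exact absurd (hall q hq) (by omega)
          have hTmem : v.sum ∈ prefixAux v 0 :=
            List.mem_of_getLast? (by rw [getLast?_prefixAux v 0 hv]; ring_nf)
          have hTS : v.sum < S := hall _ hTmem
          have hS2 : 2 ≤ S.toNat := by omega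
          have hfuel1 : v.length + 1 < F := by
            have : 2 * (v.length + 1) ≤ (S.toNat + 1) * (v.length + 1) :=
              Nat.mul_le_mul_right _ (by omega)
            omega
          obtain ⟨f, hf⟩ : ∃ f, F - v.length = f + 1 := ⟨F - v.length - 1, by omega⟩
          rw [hf]
          simp only [countAlarmsLoop]
          have hfuel2 : ((S - v.sum).toNat + 1) * (v.length + 1) ≤ f := by
            have hmono : ((S - v.sum).toNat + 2) * (v.length + 1) ≤ (S.toNat + 1) * (v.length + 1) :=
              Nat.mul_le_mul_right _ (by omega)
            have he : ((S - v.sum).toNat + 2) * (v.length + 1)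
                = ((S - v.sum).toNat + 1) * (v.length + 1) + (v.length + 1) := by ring
            omega
          rw [IH (N - 1) (by omega) v (S - v.sum) (by omega) hv (Or.inl hT)
              (i + (v.length : Int)) f hfuel2]
          rw [alt_rec v S hv hT hfg]
          ring

-- ===== VERDICT (by name: the statement is the Claim_ definition above) =====
theorem countAlarms_spec : Claim_equal_countAlarms := by
  intro v S _ hPre
  obtain ⟨hv, hdisj⟩ := hPre
  show countAlarms v S = countAlarms_alt v S
  unfold countAlarms
  have hdisj' : 0 < v.sum ∨ ∃ q ∈ prefixAux v 0, S ≤ q := by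
    rcases hdisj with h | ⟨k, hk, hle⟩
    · exact Or.inl h
    · refine Or.inr ⟨(v.take (k + 1)).sum, ?_, hle⟩
      rw [prefixAux_eq]
      exact List.mem_map.mpr ⟨k, hk, rfl⟩
  rw [loopA_main S.toNat v S le_rfl hv hdisj' 0 _ le_rfl]
  ring
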